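-- pv_equiv track=rewrite | github.com/raeez/chiral-bar-cobar | compute/lib/virasoro_pbw_genus1.py | verify_weight_dimensions
-- ===== SOURCE A (Python) =====
-- from typing import Dict, List, Tuple
--
-- State = Tuple[int, ...]
--
-- def partitions_geq(n: int, min_part: int, max_part: int | None = None):
--     """Yield partitions of n into parts >= min_part, in decreasing order."""
--     if max_part is None:
--         max_part = n
--     max_part = min(max_part, n)
--     if n == 0:
--         yield ()
--         return
--     if n < min_part:
--         return
--     for first in range(max_part, min_part - 1, -1):
--         for rest in partitions_geq(n - first, min_part, first):
--             yield (first,) + rest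
--
-- def vir_pbw_basis(weight: int) -> List[State]:
--     """PBW basis at conformal weight `weight` for the Virasoro vacuum module."""
--     if weight == 0:
--         return [()]
--     if weight == 1:
--         return []
--     return list(partitions_geq(weight, 2))
--
-- def weight_space_dimension(weight: int) -> int:
--     """Dimension of the weight-h augmentation sector."""
--     return len(vir_pbw_basis(weight))
--
-- def verify_weight_dimensions(max_weight: int = 10) -> Dict[str, bool]:
--     """Check the partition-number formula dim M_h = p(h-2)."""
--     expected = {
--         2: 1,
--         3: 1,
--         4: 2,
--         5: 2,
--         6: 4,
--         7: 4,
--         8: 7,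
--         9: 8,
--         10: 12,
--     }
--     results: Dict[str, bool] = {}
--     for weight in range(2, max_weight + 1):
--         expected_dim = expected.get(weight, weight_space_dimension(weight))
--         results[f"dim M_{weight} = {expected_dim}"] = (
--             weight_space_dimension(weight) == expected_dim
--         )
--     return results
-- ===== SOURCE B (Python) =====
-- def verify_weight_dimensions(max_weight=10):
--     """Check the partition-number formula dim M_h = p(h-2)."""
--     expected = {2: 1, 3: 1, 4: 2, 5: 2, 6: 4, 7: 4, 8: 7, 9: 8, 10: 12}
--     # dp[j] = number of partitions of j into parts >= 2 (unbounded coin change)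
--     dp = [1] + [0] * max(max_weight, 0)
--     for part in range(2, max_weight + 1):
--         new = dp[:part]
--         for j in range(part, max_weight + 1):
--             new.append(dp[j] + new[j - part])
--         dp = new
--     results = {}
--     for weight in range(2, max_weight + 1):
--         dim = dp[weight]
--         expected_dim = expected.get(weight, dim)
--         results[f"dim M_{weight} = {expected_dim}"] = (dim == expected_dim)
--     return results
-- ===== Notes on version B (the rewrite author's own statement) =====
-- stated objective: faster
-- what changed: Replaced the exponential recursive enumeration of partitions (building and counting every partition of each weight into parts >= 2) with a single O(max_weight^2) unbounded coin-change DP table whose entry dp[j] is the number of partitions of j into parts >= 2.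
import Mathlib
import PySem

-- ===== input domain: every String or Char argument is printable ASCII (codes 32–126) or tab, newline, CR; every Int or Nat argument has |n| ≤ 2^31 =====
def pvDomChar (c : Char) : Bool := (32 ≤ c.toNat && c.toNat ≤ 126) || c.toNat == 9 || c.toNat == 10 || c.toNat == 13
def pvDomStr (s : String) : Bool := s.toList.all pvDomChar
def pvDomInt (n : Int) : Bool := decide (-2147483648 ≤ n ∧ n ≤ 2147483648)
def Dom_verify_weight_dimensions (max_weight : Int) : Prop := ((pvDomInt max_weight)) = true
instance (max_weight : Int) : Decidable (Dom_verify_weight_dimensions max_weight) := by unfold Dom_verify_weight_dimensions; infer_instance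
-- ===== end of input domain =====

-- B replaces A's exponential recursive enumeration of partitions with an O(n^2)
-- coin-change DP table counting partitions into parts >= 2 (objective: faster, asymptotic).

-- ===== PORT A =====
-- partitions_geq: fuel = recursion depth bound (the Python recursion terminates because
-- every recursive call decreases n by first >= min_part = 2; fuel > n.toNat suffices).
def partitionsGeq : Nat → Int → Int → Option Int → List (List Int)
  | 0, _, _, _ => []
  | fuel + 1, n, minp, maxp =>
    let mp := min (maxp.getD n) n          -- max_part = min(max_part, n), None -> n
    if n = 0 then [[]]
    else if n < minp then []
    else (PySem.List.pyRange mp (minp - 1) (-1)).flatMap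
      (fun first => (partitionsGeq fuel (n - first) minp (some first)).map
        (fun rest => first :: rest))

def virPbwBasis (weight : Int) : List (List Int) :=
  if weight = 0 then [[]]
  else if weight = 1 then []
  else partitionsGeq (weight.toNat + 1) weight 2 none

def weightSpaceDimension (weight : Int) : Int := (virPbwBasis weight).length

def verify_weight_dimensions (max_weight : Int) : List (String × Bool) :=
  let expected : PySem.Dict Int Int :=
    PySem.Dict.ofList [(2,1),(3,1),(4,2),(5,2),(6,4),(7,4),(8,7),(9,8),(10,12)]
  ((PySem.List.pyRange 2 (max_weight + 1) 1).foldl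
    (fun (results : PySem.Dict String Bool) weight =>
      let expected_dim := expected.getD weight (weightSpaceDimension weight)
      results.insert
        ("dim M_" ++ PySem.Int.toStr weight ++ " = " ++ PySem.Int.toStr expected_dim)
        (weightSpaceDimension weight == expected_dim))
    PySem.Dict.empty).items

-- ===== PORT B =====
-- dp table of Source B: dp[j] = #partitions of j into parts >= 2, built by coin-change.
-- Python indexing dp[j], new[j-part] is always in range here, so List.getD is exact;
-- dp[:part] is List.take part (part >= 0).
def dpTable (maxN : Nat) : List Int :=
  (List.range' 2 (maxN - 1)).foldl
    (fun dp part =>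
      (List.range' part (maxN + 1 - part)).foldl
        (fun new j => new ++ [dp.getD j 0 + new.getD (j - part) 0])
        (dp.take part))
    (1 :: List.replicate maxN 0)

def verify_weight_dimensions_alt (max_weight : Int) : List (String × Bool) :=
  let expected : PySem.Dict Int Int :=
    PySem.Dict.ofList [(2,1),(3,1),(4,2),(5,2),(6,4),(7,4),(8,7),(9,8),(10,12)]
  let dp := dpTable max_weight.toNat      -- [1] + [0]*max(max_weight, 0), then the two loops
  ((PySem.List.pyRange 2 (max_weight + 1) 1).foldl
    (fun (results : PySem.Dict String Bool) weight =>
      let dim := dp.getD weight.toNat 0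
      let expected_dim := expected.getD weight dim
      results.insert
        ("dim M_" ++ PySem.Int.toStr weight ++ " = " ++ PySem.Int.toStr expected_dim)
        (dim == expected_dim))
    PySem.Dict.empty).items

-- ===== PRECONDITION & SPEC =====
def Spec_verify_weight_dimensions (max_weight : Int) (out : List (String × Bool)) : Prop := out = verify_weight_dimensions_alt max_weight
instance (max_weight : Int) (out : List (String × Bool)) : Decidable (Spec_verify_weight_dimensions max_weight out) := by unfold Spec_verify_weight_dimensions; infer_instance

-- ===== CLAIM (what is proved, stated in full; the proofs are below) =====
def Claim_equal_verify_weight_dimensions : Prop := ∀ (max_weight : Int), Dom_verify_weight_dimensions max_weight → Spec_verify_weight_dimensions max_weight (verify_weight_dimensions max_weight)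

-- ===== LEMMAS AND PROOFS =====

def cnt2 (n p : Nat) : Nat :=
  if h : p < 2 then (if n = 0 then 1 else 0)
  else cnt2 n (p - 1) + (if hp : p ≤ n then cnt2 (n - p) p else 0)
termination_by (n, p)
decreasing_by
  · exact Prod.Lex.right n (by omega)
  · exact Prod.Lex.left _ _ (by omega)

theorem cnt2_sum (m n : Nat) :
    cnt2 n m = (if n = 0 then 1 else 0)
      + ((List.range' 2 (min m n - 1)).map (fun p => cnt2 (n - p) p)).sum := by
  induction m with
  | zero => rw [cnt2]; simp
  | succ m ih =>
    by_cases hm : m + 1 < 2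
    · have hm0 : m = 0 := by omega
      subst hm0
      rw [cnt2]
      have h1 : min 1 n - 1 = 0 := by omega
      rw [h1]; simp
    · rw [cnt2, dif_neg hm]
      simp only [Nat.add_sub_cancel]
      rw [ih]
      by_cases hn : m + 1 ≤ n
      · rw [dif_pos hn]
        have h1 : min (m+1) n = m + 1 := by omega
        have h2 : min m n = m := by omega
        rw [h1, h2]
        have h3 : List.range' 2 (m + 1 - 1) = List.range' 2 (m - 1) ++ [m + 1] := by
          have h4 : m + 1 - 1 = (m - 1) + 1 := by omega
          rw [h4, List.range'_concat]
          congr 2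
          omega
        rw [h3, List.map_append, List.sum_append]
        simp
        omega
      · rw [dif_neg hn]
        have h1 : min (m+1) n = min m n := by omega
        rw [h1]
        rw [Nat.add_zero]

theorem cnt2_of_lt (i p : Nat) (h2 : 2 ≤ p) (h : i < p) : cnt2 i p = cnt2 i (p - 1) := by
  rw [cnt2, dif_neg (by omega : ¬ p < 2), dif_neg (by omega : ¬ p ≤ i), Nat.add_zero]

theorem cnt2_min (x f : Nat) : cnt2 x (min f x) = cnt2 x f := by
  rw [cnt2_sum, cnt2_sum]
  have h : min (min f x) x = min f x := by omega
  rw [h]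

theorem cnt2_of_ge (n m : Nat) (h : n ≤ m) : cnt2 n m = cnt2 n n := by
  rw [cnt2_sum, cnt2_sum]
  have h1 : min m n = n := by omega
  have h2 : min n n = n := by omega
  rw [h1, h2]

theorem enum_len : ∀ (fuel : Nat) (n : Int) (maxp : Option Int), 0 ≤ n → n.toNat < fuel →
    (partitionsGeq fuel n 2 maxp).length = cnt2 n.toNat (min (maxp.getD n) n).toNat := by
  intro fuel
  induction fuel with
  | zero => intro n maxp hn hf; omega
  | succ f ih =>
    intro n maxp hn hf
    rw [partitionsGeq]
    set mp := min (maxp.getD n) n with hmp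
    have hmpn : mp ≤ n := min_le_right _ _
    by_cases h0 : n = 0
    · subst h0
      rw [if_pos rfl, cnt2_sum]
      simp
    · rw [if_neg h0]
      by_cases h1 : n < 2
      · rw [if_pos h1]
        have h2 : n.toNat = 1 := by omega
        rw [h2, cnt2_sum]
        have h3 : min mp.toNat 1 - 1 = 0 := by omega
        rw [h3]
        simp
      · rw [if_neg h1, List.length_flatMap]
        have h21 : (2:Int) - 1 = 1 := by norm_num
        rw [h21, PySem.List.pyRange_neg_one_eq_reverse, List.map_reverse, List.sum_reverse,
            PySem.List.pyRange_one, List.map_map, cnt2_sum, if_neg (by omega),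
            List.range'_eq_map_range, List.map_map]
        simp only [show (1:Int)+1 = 2 by norm_num]
        have hK : (mp + 1 - 2).toNat = min mp.toNat n.toNat - 1 := by omega
        rw [hK]
        rw [Nat.zero_add]
        apply congrArg List.sum
        apply List.map_congr_left
        intro k hk
        rw [List.mem_range] at hk
        have hkb : (2:Int) + k ≤ mp := by omega
        simp only [Function.comp_apply, List.length_map]
        rw [ih (n - (2 + k)) (some (2 + k)) (by omega) (by omega)]
        have hx : (n - (2 + (k:Int))).toNat = n.toNat - (2 + k) := by omega
        have hmin : (min ((2:Int) + k) (n - (2 + k))).toNat = min (2 + k) (n.toNat - (2 + k)) := by omega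
        simp only [Option.getD_some, hx, hmin]
        rw [cnt2_min]

theorem cnt2_step (s p : Nat) (h2 : 2 ≤ p) (hps : p ≤ s) :
    cnt2 s p = cnt2 s (p - 1) + cnt2 (s - p) p := by
  rw [cnt2, dif_neg (by omega : ¬ p < 2), dif_pos hps]

theorem inner_inv (maxN p : Nat) (dp : List Int) (h2 : 2 ≤ p)
    (hdp : ∀ j, j ≤ maxN → dp.getD j 0 = (cnt2 j (p - 1) : Int)) :
    ∀ (c s : Nat) (new : List Int), p ≤ s → s + c = maxN + 1 →
      new.length = s → (∀ i, i < s → new.getD i 0 = (cnt2 i p : Int)) →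
      (((List.range' s c).foldl (fun nl j => nl ++ [dp.getD j 0 + nl.getD (j - p) 0]) new).length = maxN + 1
       ∧ ∀ i, i ≤ maxN → ((List.range' s c).foldl (fun nl j => nl ++ [dp.getD j 0 + nl.getD (j - p) 0]) new).getD i 0 = (cnt2 i p : Int)) := by
  intro c
  induction c with
  | zero =>
    intro s new hps hsc hlen hinv
    refine ⟨by simpa [hlen] using by omega, ?_⟩
    intro i hi
    simpa using hinv i (by omega)
  | succ c ihc =>
    intro s new hps hsc hlen hinv
    rw [List.range'_succ]
    simp only [List.foldl_cons]
    apply ihc (s + 1) _ (by omega) (by omega)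
    · simp [hlen]
    · intro i hi
      by_cases hilt : i < s
      · rw [List.getD_append _ _ _ _ (by omega)]
        exact hinv i hilt
      · have hieq : i = s := by omega
        subst hieq
        rw [List.getD_append_right _ _ _ _ (by omega), hlen]
        simp only [Nat.sub_self, List.getD_cons_zero]
        have hs : i ≤ maxN := by omega
        rw [hdp i hs, hinv (i - p) (by omega), cnt2_step i p h2 (by omega)]
        push_cast
        ring

theorem outer_inv (maxN : Nat) :
    ∀ (cp p : Nat) (dp : List Int), 2 ≤ p → p + cp ≤ maxN + 2 →
      dp.length = maxN + 1 → (∀ j, j ≤ maxN → dp.getD j 0 = (cnt2 j (p - 1) : Int)) →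
      (((List.range' p cp).foldl
          (fun dp part =>
            (List.range' part (maxN + 1 - part)).foldl
              (fun new j => new ++ [dp.getD j 0 + new.getD (j - part) 0])
              (dp.take part)) dp).length = maxN + 1
       ∧ ∀ j, j ≤ maxN → ((List.range' p cp).foldl
          (fun dp part =>
            (List.range' part (maxN + 1 - part)).foldl
              (fun new j => new ++ [dp.getD j 0 + new.getD (j - part) 0])
              (dp.take part)) dp).getD j 0 = (cnt2 j (p + cp - 1) : Int)) := by
  intro cp
  induction cp with
  | zero =>
    intro p dp hp hb hlen hinv
    exact ⟨hlen, fun j hj => hinv j hj⟩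
  | succ c ihc =>
    intro p dp hp hb hlen hinv
    rw [List.range'_succ]
    simp only [List.foldl_cons]
    have htake : ∀ i, i < p → (dp.take p).getD i 0 = (cnt2 i p : Int) := by
      intro i hi
      rw [List.getD_eq_getElem?_getD, List.getElem?_take]
      simp only [hi, if_pos]
      rw [← List.getD_eq_getElem?_getD, hinv i (by omega), ← cnt2_of_lt i p hp hi]
    have hinner := inner_inv maxN p dp hp hinv (maxN + 1 - p) p (dp.take p) le_rfl
      (by omega) (by simp [hlen]; omega) htake
    have := ihc (p + 1) _ (by omega) (by omega) hinner.1 (by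
      intro j hj
      simpa using hinner.2 j hj)
    refine ⟨this.1, fun j hj => ?_⟩
    have h := this.2 j hj
    have harith : p + 1 + c - 1 = p + (c + 1) - 1 := by omega
    rwa [harith] at h

theorem dpTable_getD (maxN : Nat) (h2 : 2 ≤ maxN) :
    ∀ j, j ≤ maxN → (dpTable maxN).getD j 0 = (cnt2 j maxN : Int) := by
  intro j hj
  have hinit : ∀ i, i ≤ maxN → (((1 : Int) :: List.replicate maxN 0).getD i 0) = (cnt2 i 1 : Int) := by
    intro i hi
    cases i with
    | zero => rw [cnt2]; simp
    | succ i =>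
      rw [cnt2]
      simp [List.getD_eq_getElem?_getD]
  have h := outer_inv maxN (maxN - 1) 2 (1 :: List.replicate maxN 0) le_rfl (by omega)
    (by simp) (by simpa using hinit)
  have harith : 2 + (maxN - 1) - 1 = maxN := by omega
  rw [dpTable]
  have := h.2 j hj
  rwa [harith] at this


theorem wsd_eq_dp (mw w : Int) (hw2 : 2 ≤ w) (hwm : w ≤ mw) :
    (dpTable mw.toNat).getD w.toNat 0 = weightSpaceDimension w := by
  have hlen := enum_len (w.toNat + 1) w none (by omega) (by omega)
  have hwsd : weightSpaceDimension w = (cnt2 w.toNat w.toNat : Int) := by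
    rw [weightSpaceDimension, virPbwBasis, if_neg (by omega), if_neg (by omega), hlen]
    congr 2
    simp
  have hdp := dpTable_getD mw.toNat (by omega) w.toNat (by omega)
  rw [cnt2_of_ge w.toNat mw.toNat (by omega)] at hdp
  exact hdp.trans hwsd.symm

-- ===== VERDICT (by name: the statement is the Claim_ definition above) =====
theorem verify_weight_dimensions_spec : Claim_equal_verify_weight_dimensions := by
  intro mw _hdom
  unfold Spec_verify_weight_dimensions
  simp only [verify_weight_dimensions, verify_weight_dimensions_alt]
  apply congrArg
  apply PySem.List.foldl_congr_mem
  intro acc w hw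
  rw [PySem.List.mem_pyRange_one] at hw
  rw [wsd_eq_dp mw w (by omega) (by omega)]
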